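-- pv_equiv track=rewrite | github.com/kh277/BOJ | 백준/Silver/14584. 암호 해독/암호 해독.py | solve
-- ===== SOURCE A (Python) =====
-- def change(string):
--     result = []
--     for i in range(len(string)):
--         result.append(chr((ord(string[i])-97+1)%26 + 97))
--
--     return ''.join(result)
--
-- def solve(enc, words):
--     for _ in range(26):
--         flag = False
--         for w in words:
--             if w in enc:
--                 flag = True
--
--         if flag == True:
--             return enc
--
--         enc = change(enc)
-- ===== SOURCE B (Python) =====
-- def solve(enc, words):
--     # shift 0: the ciphertext itself
--     if any(w in enc for w in words):
--         return enc
--     # For every other shift the text consists only of 'a'..'z', so a word can occur only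
--     # if it is nonempty and all lowercase, and consecutive-character differences mod 26
--     # are invariant under shifting: w occurs at position i in the k-shifted text iff the
--     # difference profile of w matches that of enc at i, and then the shift is forced:
--     # k = (ord(w[0]) - ord(enc[i])) % 26.  Collect every forced shift and take the
--     # smallest nonzero one (shift 0 via the %26 mangling is never reached by the cycle).
--     # Duplicate words contribute nothing, so scan each distinct word once.
--     de = bytes((ord(enc[j + 1]) - ord(enc[j])) % 26 for j in range(len(enc) - 1))
--     shifts = []
--     for w in dict.fromkeys(words):
--         if not w or not all('a' <= ch <= 'z' for ch in w):
--             continue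
--         dw = bytes((ord(w[j + 1]) - ord(w[j])) % 26 for j in range(len(w) - 1))
--         for i in range(len(enc) - len(w) + 1):
--             if de[i:i + len(dw)] == dw:
--                 shifts.append((ord(w[0]) - ord(enc[i])) % 26)
--     shifts = [k for k in shifts if k != 0]
--     if shifts:
--         k = min(shifts)
--         return ''.join(chr((ord(c) - 97 + k) % 26 + 97) for c in enc)
-- ===== Notes on version B (the rewrite author's own statement) =====
-- stated objective: faster
-- what changed: B never enumerates the 26 shifts: after checking the ciphertext itself it deduplicates the words, computes the consecutive-difference profile of enc (shift-invariant) once, and for each distinct word finds the alignments whose difference profile matches, where the shift is forced as (ord(w[0])-ord(enc[i]))%26; it returns enc shifted by the minimum nonzero forced shift, while A re-encrypts enc and substring-scans every word 26 times.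
-- outside the precondition, e.g. on solve('abc', ['zzz']): A returns None, B returns None
import Mathlib
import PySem

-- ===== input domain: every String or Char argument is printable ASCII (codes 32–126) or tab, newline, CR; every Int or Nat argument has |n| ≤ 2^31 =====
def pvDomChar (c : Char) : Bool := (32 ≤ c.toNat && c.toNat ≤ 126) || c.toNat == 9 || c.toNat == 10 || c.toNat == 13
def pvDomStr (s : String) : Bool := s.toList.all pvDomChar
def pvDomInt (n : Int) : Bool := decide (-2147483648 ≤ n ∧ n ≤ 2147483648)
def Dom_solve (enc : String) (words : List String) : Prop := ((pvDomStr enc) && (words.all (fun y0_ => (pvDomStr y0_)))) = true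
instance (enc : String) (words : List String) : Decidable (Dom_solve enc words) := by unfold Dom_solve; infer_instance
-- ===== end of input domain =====

-- B replaces A's 26-shift enumeration by deriving the shift forced at each word/alignment
-- from character differences and taking the minimum nonzero one; return-value equivalence
-- on Pre_solve (the inputs where A returns a string rather than None).

-- chr((ord(c) - 97 + k) % 26 + 97); A's change uses it with k = 1, B's final join with k = best
def pvShiftChar (k : Int) (c : Char) : Char :=
  Char.ofNat (PySem.Int.mod ((c.toNat : Int) - 97 + k) 26 + 97).toNat

-- ===== PORT A =====
-- def change(string): result = []; for i: result.append(chr((ord-97+1)%26+97)); return ''.join(result)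
def pvChange (s : List Char) : List Char :=
  s.foldl (fun r c => r ++ [pvShiftChar 1 c]) []

-- flag = False; for w in words: if w in enc: flag = True
def pvFlag (ws : List (List Char)) (e : List Char) : Bool :=
  ws.foldl (fun f w => if PySem.Chars.isIn w e then true else f) false

-- for _ in range(26): … ; falls off the loop = Python returns None (outside Pre_solve; port yields [])
def solveLoopA : Nat → List Char → List (List Char) → List Char
  | 0, _, _ => []
  | n+1, e, ws => if pvFlag ws e then e else solveLoopA n (pvChange e) ws

def solve (enc : String) (words : List String) : String :=
  String.ofList (solveLoopA 26 enc.toList (words.map String.toList))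

-- ===== PORT B =====
def pvShiftBy (k : Int) (s : List Char) : List Char := s.map (pvShiftChar k)

-- any(w in enc for w in words)
def pvHit (ws : List (List Char)) (s : List Char) : Bool :=
  ws.any (fun w => PySem.Chars.isIn w s)

-- [(ord(s[j+1]) - ord(s[j])) % 26 for j in range(len(s) - 1)]
def pvDiffs (s : List Char) : List Int :=
  (PySem.List.pyRange 0 ((s.length : Int) - 1) 1).map (fun j =>
    PySem.Int.mod (((PySem.List.pyGetD s (j + 1) ' ').toNat : Int)
      - ((PySem.List.pyGetD s j ' ').toNat : Int)) 26)

-- (ord(w[0]) - ord(enc[i])) % 26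
def pvK (e w : List Char) (i : Int) : Int :=
  PySem.Int.mod (((PySem.List.pyGetD w 0 ' ').toNat : Int) - ((PySem.List.pyGetD e i ' ').toNat : Int)) 26

-- w and all('a' <= ch <= 'z' for ch in w)   (ord-based transliteration of the char comparisons)
def pvLowerWord (w : List Char) : Bool :=
  !w.isEmpty && w.all (fun ch => 97 ≤ ch.toNat && ch.toNat ≤ 122)

-- the nested for-loops (over the distinct words, dict.fromkeys) collecting forced shifts
-- of all alignments whose difference profiles match
def pvShifts (de : List Int) (e : List Char) (ws : List (List Char)) : List Int :=
  (PySem.List.dedup ws).foldl (fun acc w =>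
    if pvLowerWord w then
      let dw := pvDiffs w
      (PySem.List.pyRange 0 ((e.length : Int) - (w.length : Int) + 1) 1).foldl
        (fun acc2 i =>
          if PySem.List.slice de (some i) (some (i + (dw.length : Int))) == dw
          then acc2 ++ [pvK e w i] else acc2) acc
    else acc) []

def solve_alt (enc : String) (words : List String) : String :=
  let e := enc.toList
  let ws := words.map String.toList
  if pvHit ws e then enc
  else
    let de := pvDiffs e
    match PySem.List.min? ((pvShifts de e ws).filter (fun k => k != 0)) (fun k => k) with
    | some k => String.ofList (pvShiftBy k e)
    | none => ""   -- Python B falls off and returns None here (outside Pre_solve)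

-- ===== PRECONDITION & SPEC =====
-- Pre_solve excludes exactly the inputs on which A (and B) return None instead of a string:
-- no word occurs in the ciphertext or in any of its 25 nonzero Caesar shifts.
def Pre_solve (enc : String) (words : List String) : Prop :=
  (pvHit (words.map String.toList) enc.toList
    || (List.range' 1 25).any (fun k : Nat => pvHit (words.map String.toList) (pvShiftBy (k : Int) enc.toList))) = true

instance (enc : String) (words : List String) : Decidable (Pre_solve enc words) := by
  unfold Pre_solve; infer_instance

def pvWitness_solve : String × List String := ("abc", ["bcd"])

def Spec_solve (enc : String) (words : List String) (out : String) : Prop := out = solve_alt enc words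
instance (enc : String) (words : List String) (out : String) : Decidable (Spec_solve enc words out) := by
  unfold Spec_solve; infer_instance

-- ===== CLAIM (what is proved, stated in full; the proofs are below) =====
def Claim_equal_solve : Prop := ∀ (enc : String) (words : List String), Dom_solve enc words → Pre_solve enc words → Spec_solve enc words (solve enc words)

-- ===== LEMMAS AND PROOFS =====

-- A's state after j iterations of the loop
def pvAState (e : List Char) (j : Nat) : List Char :=
  if j = 0 then e else pvShiftBy (j : Int) e

lemma pvFlag_eq_pvHit (ws : List (List Char)) (e : List Char) : pvFlag ws e = pvHit ws e := by
  have aux : ∀ (l : List (List Char)) (b : Bool),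
      l.foldl (fun f w => if PySem.Chars.isIn w e then true else f) b
        = (b || l.any (fun w => PySem.Chars.isIn w e)) := by
    intro l
    induction l with
    | nil => simp
    | cons w t ih =>
        intro b
        simp only [List.foldl_cons, List.any_cons, ih]
        by_cases h : PySem.Chars.isIn w e <;> simp [h]
  simpa [pvFlag, pvHit] using aux ws false

lemma pvShiftChar_comp (k : Int) (c : Char) :
    pvShiftChar 1 (pvShiftChar k c) = pvShiftChar (k + 1) c := by
  have hmod : ∀ a : Int, PySem.Int.mod a 26 = a % 26 := fun a =>
    PySem.Int.mod_eq_emod_of_pos (by norm_num)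
  simp only [pvShiftChar, hmod]
  set m : Int := ((c.toNat : Int) - 97 + k) % 26 with hm
  have hm0 : 0 ≤ m := Int.emod_nonneg _ (by norm_num)
  have hm26 : m < 26 := Int.emod_lt_of_pos _ (by norm_num)
  have hfold : ((c.toNat : Int) - 97 + (k + 1)) % 26 = (m + 1) % 26 := by
    rw [hm, Int.emod_add_emod]; ring_nf
  rw [hfold]
  interval_cases m <;> decide

lemma pvChange_eq (s : List Char) : pvChange s = pvShiftBy 1 s := by
  show s.foldl (fun r c => r ++ [pvShiftChar 1 c]) [] = s.map (pvShiftChar 1)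
  rw [PySem.List.foldl_append_singleton_eq_map]
  simp

lemma pvChange_shiftBy (k : Int) (s : List Char) :
    pvChange (pvShiftBy k s) = pvShiftBy (k + 1) s := by
  simp [pvChange_eq, pvShiftBy, List.map_map, Function.comp_def, pvShiftChar_comp]

lemma pvAState_succ (e : List Char) (j : Nat) :
    pvChange (pvAState e j) = pvAState e (j + 1) := by
  cases j with
  | zero => simp [pvAState, pvChange_eq]
  | succ m =>
      rw [show pvAState e (m + 1) = pvShiftBy ((m + 1 : Nat) : Int) e from by simp [pvAState],
        show pvAState e (m + 1 + 1) = pvShiftBy ((m + 1 + 1 : Nat) : Int) e from by simp [pvAState],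
        pvChange_shiftBy]
      rw [show ((m + 1 + 1 : Nat) : Int) = ((m + 1 : Nat) : Int) + 1 from by push_cast; ring]

lemma solveLoopA_eq (ws : List (List Char)) (e : List Char) :
    ∀ (n j : Nat), solveLoopA n (pvAState e j) ws =
      (match (List.range' j n).find? (fun k => pvHit ws (pvAState e k)) with
       | some k => pvAState e k
       | none => []) := by
  intro n
  induction n with
  | zero => intro j; simp [solveLoopA]
  | succ m ih =>
      intro j
      rw [List.range'_succ, List.find?_cons]
      simp only [solveLoopA, pvFlag_eq_pvHit]
      by_cases h : pvHit ws (pvAState e j)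
      · simp [h]
      · simp only [h, if_neg, Bool.false_eq_true, not_false_eq_true]
        rw [pvAState_succ, ih (j + 1)]

lemma find?_pred_congr (ws : List (List Char)) (e : List Char) (l : List Nat) (h0 : 0 ∉ l) :
    l.find? (fun k : Nat => pvHit ws (pvAState e k))
      = l.find? (fun k : Nat => pvHit ws (pvShiftBy (k : Int) e)) := by
  induction l with
  | nil => rfl
  | cons a t ih =>
      have ha : a ≠ 0 := fun h => h0 (h ▸ List.mem_cons_self)
      have ht : 0 ∉ t := fun h => h0 (List.mem_cons_of_mem _ h)
      rw [List.find?_cons, List.find?_cons, ih ht]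
      simp [pvAState, ha]

-- Char.ofNat round-trips on valid code points
lemma char_ofNat_toNat (n : Nat) (h : n < 0xd800) : (Char.ofNat n).toNat = n := by
  unfold Char.ofNat
  rw [dif_pos (by exact Or.inl h : n.isValidChar)]
  rfl

lemma char_eq_of_toNat (c d : Char) (h : c.toNat = d.toNat) : c = d := by
  exact Char.le_antisymm (by simp [Char.le_def, UInt32.le_iff_toNat_le] at *; omega)
    (by simp [Char.le_def, UInt32.le_iff_toNat_le] at *; omega)

-- character-level: the shifted character equals d iff d is lowercase and the shift is forced
lemma pvShiftChar_eq_iff (k : Int) (hk0 : 0 ≤ k) (hk : k < 26) (c d : Char) :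
    pvShiftChar k c = d ↔
      (97 ≤ d.toNat ∧ d.toNat ≤ 122 ∧
        PySem.Int.mod ((d.toNat : Int) - (c.toNat : Int)) 26 = k) := by
  have hmod : ∀ a : Int, PySem.Int.mod a 26 = a % 26 := fun a =>
    PySem.Int.mod_eq_emod_of_pos (by norm_num)
  simp only [pvShiftChar, hmod]
  have hm0 : 0 ≤ ((c.toNat : Int) - 97 + k) % 26 := Int.emod_nonneg _ (by norm_num)
  have hm26 : ((c.toNat : Int) - 97 + k) % 26 < 26 := Int.emod_lt_of_pos _ (by norm_num)
  have htn : (Char.ofNat (((c.toNat : Int) - 97 + k) % 26 + 97).toNat).toNat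
      = (((c.toNat : Int) - 97 + k) % 26 + 97).toNat :=
    char_ofNat_toNat _ (by omega)
  constructor
  · intro h
    rw [← h]
    refine ⟨by omega, by omega, ?_⟩
    rw [htn]; omega
  · rintro ⟨h97, h122, hmk⟩
    apply char_eq_of_toNat
    rw [htn]; omega

-- mapping the shift over a segment produces w iff every position forces shift k on a lowercase char
lemma map_shift_eq_iff (k : Int) (hk0 : 0 ≤ k) (hk : k < 26) (m w : List Char) :
    m.map (pvShiftChar k) = w ↔
      (m.length = w.length ∧ ∀ j (hw : j < w.length) (hm : j < m.length),
        97 ≤ (w[j]).toNat ∧ (w[j]).toNat ≤ 122 ∧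
          PySem.Int.mod (((w[j]).toNat : Int) - ((m[j]).toNat : Int)) 26 = k) := by
  induction m generalizing w with
  | nil => cases w <;> simp
  | cons a t ih =>
      cases w with
      | nil => simp
      | cons b u =>
          simp only [List.map_cons, List.cons.injEq, List.length_cons]
          rw [ih u]
          constructor
          · rintro ⟨hab, hlen, hall⟩
            refine ⟨by omega, ?_⟩
            intro j hw hm
            cases j with
            | zero => simpa using (pvShiftChar_eq_iff k hk0 hk a b).mp hab
            | succ n => simpa using hall n (by omega) (by omega)
          · rintro ⟨hlen, hall⟩
            refine ⟨(pvShiftChar_eq_iff k hk0 hk a b).mpr (by simpa using hall 0 (by omega) (by omega)),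
              by omega, ?_⟩
            intro j hw hm
            simpa using hall (j+1) (by omega) (by omega)

-- infix of a mapped list = a contiguous segment mapping onto w
lemma infix_map_iff (f : Char → Char) (w e : List Char) :
    w <:+: e.map f ↔ ∃ i : Nat, i + w.length ≤ e.length ∧
      ((e.drop i).take w.length).map f = w := by
  constructor
  · rintro ⟨p, q, hpq⟩
    rcases List.map_eq_append_iff.mp hpq.symm with ⟨p', r, he, hp', hr⟩
    rcases List.map_eq_append_iff.mp hp' with ⟨pa, mseg, hp'eq, hpa, hm⟩
    have h2 : mseg.length = w.length := by rw [← hm]; simp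
    refine ⟨pa.length, ?_, ?_⟩
    · have h1 : e.length = pa.length + mseg.length + r.length := by
        subst he hp'eq; simp; omega
      omega
    · have hdrop : e.drop pa.length = mseg ++ r := by
        subst he hp'eq; simp
      rw [hdrop, ← h2, List.take_left, hm]
  · rintro ⟨i, hlen, hmap⟩
    have hdd : e.drop (i + w.length) = (e.drop i).drop w.length := by
      rw [List.drop_drop]
    have hE : e.take i ++ ((e.drop i).take w.length ++ e.drop (i + w.length)) = e := by
      rw [hdd, List.take_append_drop, List.take_append_drop]
    refine ⟨(e.take i).map f, (e.drop (i + w.length)).map f, ?_⟩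
    calc (e.take i).map f ++ w ++ (e.drop (i + w.length)).map f
        = (e.take i).map f ++ ((e.drop i).take w.length).map f
            ++ (e.drop (i + w.length)).map f := by rw [hmap]
      _ = e.map f := by
            rw [← List.map_append, ← List.map_append, List.append_assoc, hE]

-- the aligned segment of e, with its indexing facts
lemma seg_getElem (e w : List Char) (i : Nat) (hle : i + w.length ≤ e.length)
    (j : Nat) (hj : j < w.length) (hj2 : j < ((e.drop i).take w.length).length) :
    ((e.drop i).take w.length)[j] = e[i + j]'(by omega) := by
  rw [List.getElem_take, List.getElem_drop]

lemma seg_len (e w : List Char) (i : Nat) (hle : i + w.length ≤ e.length) :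
    ((e.drop i).take w.length).length = w.length := by
  simp; omega

-- facts about the difference profile
lemma pvDiffs_length (s : List Char) : (pvDiffs s).length = s.length - 1 := by
  unfold pvDiffs
  rw [List.length_map, PySem.List.length_pyRange_one]
  omega

lemma pvDiffs_getElem (s : List Char) (j : Nat) (h : j < s.length - 1)
    (h2 : j < (pvDiffs s).length) :
    (pvDiffs s)[j] =
      PySem.Int.mod (((s[j + 1]'(by omega)).toNat : Int) - ((s[j]'(by omega)).toNat : Int)) 26 := by
  unfold pvDiffs
  rw [List.getElem_map, PySem.List.getElem_pyRange_one]
  have hg1 : PySem.List.pyGetD s (((j : Nat) : Int) + 1) ' ' = s[j + 1]'(by omega) := by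
    rw [show (((j : Nat) : Int) + 1) = (((j + 1 : Nat) : Nat) : Int) from by push_cast; ring]
    rw [PySem.List.pyGetD_eq_getElem s ' ' (by omega) (by push_cast; omega)]
    exact getElem_congr rfl (by omega) (by omega)
  have hg0 : PySem.List.pyGetD s ((j : Nat) : Int) ' ' = s[j]'(by omega) := by
    rw [PySem.List.pyGetD_eq_getElem s ' ' (by omega) (by omega)]
    exact getElem_congr rfl (by omega) (by omega)
  rw [show ((0 : Int) + (j : Nat)) = ((j : Nat) : Int) from by ring, hg1, hg0]

-- the fold-with-append collecting loop, as a flatMap over words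
lemma pvShifts_eq (de : List Int) (e : List Char) (ws : List (List Char)) :
    pvShifts de e ws = (PySem.List.dedup ws).flatMap (fun w =>
      if pvLowerWord w then
        ((PySem.List.pyRange 0 ((e.length : Int) - (w.length : Int) + 1) 1).filter
          (fun i => PySem.List.slice de (some i) (some (i + ((pvDiffs w).length : Int)))
            == pvDiffs w)).map (pvK e w)
      else []) := by
  have aux : ∀ (l : List (List Char)) (acc : List Int),
      l.foldl (fun acc w =>
        if pvLowerWord w then
          let dw := pvDiffs w
          (PySem.List.pyRange 0 ((e.length : Int) - (w.length : Int) + 1) 1).foldl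
            (fun acc2 i =>
              if PySem.List.slice de (some i) (some (i + (dw.length : Int))) == dw
              then acc2 ++ [pvK e w i] else acc2) acc
        else acc) acc
      = acc ++ l.flatMap (fun w =>
          if pvLowerWord w then
            ((PySem.List.pyRange 0 ((e.length : Int) - (w.length : Int) + 1) 1).filter
              (fun i => PySem.List.slice de (some i) (some (i + ((pvDiffs w).length : Int)))
                == pvDiffs w)).map (pvK e w)
          else []) := by
    intro l
    induction l with
    | nil => intro acc; simp
    | cons w t ih =>
        intro acc
        simp only [List.foldl_cons, List.flatMap_cons]
        by_cases hlw : pvLowerWord w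
        · rw [if_pos hlw, if_pos hlw]
          rw [PySem.List.foldl_append_if
            (p := fun i => PySem.List.slice de (some i) (some (i + ((pvDiffs w).length : Int)))
              == pvDiffs w) (f := pvK e w), ih]
          rw [List.append_assoc]
        · rw [if_neg hlw, if_neg hlw, ih]
          simp
  exact aux (PySem.List.dedup ws) []

-- the slice test says exactly that every position of w forces the same shift pvK e w i
lemma ok_iff (e w : List Char) (hwlen : 0 < w.length) (i : Int) (hi0 : 0 ≤ i)
    (hle : i.toNat + w.length ≤ e.length) :
    (PySem.List.slice (pvDiffs e) (some i) (some (i + ((pvDiffs w).length : Int)))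
        == pvDiffs w) = true ↔
      (∀ j (hj : j < w.length),
        PySem.Int.mod (((w[j]).toNat : Int) - ((e[i.toNat + j]'(by omega)).toNat : Int)) 26
          = pvK e w i) := by
  have hmod : ∀ a : Int, PySem.Int.mod a 26 = a % 26 := fun a =>
    PySem.Int.mod_eq_emod_of_pos (by norm_num)
  have hdwlen : (pvDiffs w).length = w.length - 1 := pvDiffs_length w
  have hdelen : (pvDiffs e).length = e.length - 1 := pvDiffs_length e
  have hslice : PySem.List.slice (pvDiffs e) (some i) (some (i + ((pvDiffs w).length : Int)))
      = ((pvDiffs e).drop i.toNat).take (pvDiffs w).length := by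
    rw [PySem.List.slice_toNat _ hi0 (by omega)]
    congr 1
    omega
  have htlen : (((pvDiffs e).drop i.toNat).take (pvDiffs w).length).length
      = (pvDiffs w).length := by
    rw [List.length_take, List.length_drop]
    omega
  -- pvK in getElem form
  have hK : pvK e w i = PySem.Int.mod (((w[0]'(by omega)).toNat : Int)
      - ((e[i.toNat]'(by omega)).toNat : Int)) 26 := by
    unfold pvK
    rw [PySem.List.pyGetD_eq_getElem w ' ' (by norm_num) (by exact_mod_cast hwlen),
      PySem.List.pyGetD_eq_getElem e ' ' hi0 (by omega)]
    norm_num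
  rw [hslice, beq_iff_eq]
  -- list equality as pointwise difference equality
  have hlist : (((pvDiffs e).drop i.toNat).take (pvDiffs w).length = pvDiffs w) ↔
      (∀ j (hj : j < w.length - 1),
        PySem.Int.mod (((e[i.toNat + j + 1]'(by omega)).toNat : Int)
          - ((e[i.toNat + j]'(by omega)).toNat : Int)) 26
        = PySem.Int.mod (((w[j + 1]'(by omega)).toNat : Int)
          - ((w[j]'(by omega)).toNat : Int)) 26) := by
    constructor
    · intro heq j hj
      have hj2 : j < (pvDiffs w).length := by omega
      have := List.getElem_of_eq heq (i := j) (by omega)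
      rw [List.getElem_take, List.getElem_drop] at this
      rw [pvDiffs_getElem e (i.toNat + j) (by omega) (by omega)] at this
      rw [pvDiffs_getElem w j (by omega) hj2] at this
      exact this
    · intro hall
      apply List.ext_getElem (by omega)
      intro j hj1 hj2
      rw [List.getElem_take, List.getElem_drop,
        pvDiffs_getElem e (i.toNat + j) (by omega) (by omega),
        pvDiffs_getElem w j (by omega) (by omega)]
      exact hall j (by omega)
  rw [hlist]
  constructor
  · intro hall j hj
    induction j with
    | zero =>
        have hz : (e[i.toNat + 0]'(by omega) : Char) = e[i.toNat]'(by omega) :=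
          getElem_congr rfl (by omega) (by omega)
        rw [hK, hz]
    | succ n ihn =>
        have hA := ihn (by omega)
        have hD := hall n (by omega)
        have hc : (e[i.toNat + (n + 1)]'(by omega) : Char) = e[i.toNat + n + 1]'(by omega) :=
          getElem_congr rfl (by omega) (by omega)
        rw [hK, hc] at *
        rw [hmod, hmod] at hA hD ⊢
        omega
  · intro hall j hj
    have hA1 := hall j (by omega)
    have hA2 := hall (j + 1) (by omega)
    have hc : (e[i.toNat + (j + 1)]'(by omega) : Char) = e[i.toNat + j + 1]'(by omega) :=
      getElem_congr rfl (by omega) (by omega)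
    rw [hK] at hA1 hA2
    rw [hc] at hA2
    rw [hmod, hmod] at hA1 hA2 ⊢
    omega

-- every collected shift is in [0,26), and some word really occurs in the k-shifted text
lemma pvShifts_sound (e : List Char) (ws : List (List Char)) (k : Int)
    (hk : k ∈ pvShifts (pvDiffs e) e ws) :
    0 ≤ k ∧ k < 26 ∧ pvHit ws (pvShiftBy k e) = true := by
  rw [pvShifts_eq] at hk
  rcases List.mem_flatMap.mp hk with ⟨w, hwmem', hkw⟩
  have hwmem : w ∈ ws := (PySem.List.mem_dedup ws w).mp hwmem'
  by_cases hlw : pvLowerWord w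
  · rw [if_pos hlw] at hkw
    rcases List.mem_map.mp hkw with ⟨i, hif, hki⟩
    rcases List.mem_filter.mp hif with ⟨hi, hsl⟩
    rcases PySem.List.mem_pyRange_one.mp hi with ⟨hi0, hi1⟩
    have hk0 : 0 ≤ k := hki ▸ PySem.Int.mod_nonneg _ (by norm_num)
    have hk26 : k < 26 := hki ▸ PySem.Int.mod_lt _ (by norm_num)
    refine ⟨hk0, hk26, ?_⟩
    have hwne : w ≠ [] := by
      rcases Bool.and_eq_true_iff.mp hlw with ⟨h1, _⟩
      simpa using h1
    have hwlen : 0 < w.length := List.length_pos_iff.mpr hwne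
    have hle : i.toNat + w.length ≤ e.length := by omega
    have hall := (ok_iff e w hwlen i hi0 hle).mp hsl
    have hmap : ((e.drop i.toNat).take w.length).map (pvShiftChar k) = w := by
      rw [map_shift_eq_iff k hk0 hk26]
      refine ⟨seg_len e w i.toNat hle, ?_⟩
      intro j hw hm
      have hbound : 97 ≤ (w[j]).toNat ∧ (w[j]).toNat ≤ 122 := by
        rcases Bool.and_eq_true_iff.mp hlw with ⟨_, h2⟩
        have := List.all_eq_true.mp h2 _ (List.getElem_mem hw)
        simpa using this
      refine ⟨hbound.1, hbound.2, ?_⟩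
      rw [seg_getElem e w i.toNat hle j hw hm]
      rw [hall j hw, hki]
    apply List.any_eq_true.mpr
    exact ⟨w, hwmem, (PySem.Chars.isIn_iff_infix _ _).mpr
      ((infix_map_iff (pvShiftChar k) w e).mpr ⟨i.toNat, hle, hmap⟩)⟩
  · rw [if_neg hlw] at hkw; simp at hkw

-- conversely, any hit at a shift k ∈ [0,26) is collected (when no word is empty)
lemma pvShifts_complete (e : List Char) (ws : List (List Char))
    (hne : ∀ w ∈ ws, w ≠ []) (k : Int) (hk0 : 0 ≤ k) (hk : k < 26)
    (hp : pvHit ws (pvShiftBy k e) = true) : k ∈ pvShifts (pvDiffs e) e ws := by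
  rcases List.any_eq_true.mp hp with ⟨w, hwmem, hin⟩
  have hinf := (PySem.Chars.isIn_iff_infix _ _).mp hin
  rcases (infix_map_iff (pvShiftChar k) w e).mp hinf with ⟨i, hle, hmap⟩
  rcases (map_shift_eq_iff k hk0 hk _ w).mp hmap with ⟨hlen, hall⟩
  have hwne : w ≠ [] := hne w hwmem
  have hwlen : 0 < w.length := List.length_pos_iff.mpr hwne
  have hslen : ((e.drop i).take w.length).length = w.length := seg_len e w i hle
  have hfact : ∀ j (hj : j < w.length),
      97 ≤ (w[j]).toNat ∧ (w[j]).toNat ≤ 122 ∧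
        PySem.Int.mod (((w[j]).toNat : Int) - ((e[i+j]'(by omega)).toNat : Int)) 26 = k := by
    intro j hj
    have := hall j hj (by omega)
    rwa [seg_getElem e w i hle j hj (by omega)] at this
  have hlw : pvLowerWord w = true := by
    apply Bool.and_eq_true_iff.mpr
    refine ⟨by simpa using hwne, List.all_eq_true.mpr ?_⟩
    intro ch hch
    rcases List.getElem_of_mem hch with ⟨j, hj, rfl⟩
    have := hfact j hj
    simp only [Bool.and_eq_true, decide_eq_true_eq]
    omega
  have hiN : (((i : Nat) : Int)).toNat = i := by omega
  have hKi : pvK e w ((i : Nat) : Int) = k := by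
    unfold pvK
    rw [PySem.List.pyGetD_eq_getElem w ' ' (by norm_num) (by exact_mod_cast hwlen)]
    rw [PySem.List.pyGetD_eq_getElem e ' ' (by omega) (by exact_mod_cast (by omega : i < e.length))]
    have h0 := (hfact 0 hwlen).2.2
    simp only [Nat.add_zero] at h0
    have hc0 : (w[Int.toNat 0]'(by omega) : Char) = w[0]'(by omega) :=
      getElem_congr rfl (by norm_num) (by omega)
    have hc1 : (e[(((i : Nat) : Int)).toNat]'(by omega) : Char) = e[i]'(by omega) :=
      getElem_congr rfl (by omega) (by omega)
    rw [hc0, hc1]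
    exact h0
  have hsl : (PySem.List.slice (pvDiffs e) (some ((i : Nat) : Int))
      (some (((i : Nat) : Int) + ((pvDiffs w).length : Int))) == pvDiffs w) = true := by
    rw [ok_iff e w hwlen _ (by omega) (by rw [hiN]; exact hle)]
    intro j hj
    rw [hKi]
    have hc3 : (e[(((i : Nat) : Int)).toNat + j]'(by omega) : Char) = e[i + j]'(by omega) :=
      getElem_congr rfl (by omega) (by omega)
    rw [hc3]
    exact (hfact j hj).2.2
  rw [pvShifts_eq]
  apply List.mem_flatMap.mpr
  refine ⟨w, (PySem.List.mem_dedup ws w).mpr hwmem, ?_⟩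
  rw [if_pos hlw]
  apply List.mem_map.mpr
  refine ⟨((i : Nat) : Int), List.mem_filter.mpr
    ⟨PySem.List.mem_pyRange_one.mpr ⟨by omega, by omega⟩, hsl⟩, hKi⟩

-- ===== VERDICT (by name: the statement is the Claim_ definition above) =====
theorem solve_spec : Claim_equal_solve := by
  intro enc words _hdom hpre
  unfold Spec_solve solve solve_alt
  have h0 : pvAState enc.toList 0 = enc.toList := by simp [pvAState]
  have hmain := solveLoopA_eq (words.map String.toList) enc.toList 26 0
  rw [h0] at hmain
  rw [hmain, show List.range' 0 26 = 0 :: List.range' 1 25 from by decide, List.find?_cons]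
  by_cases hhit : pvHit (words.map String.toList) (pvAState enc.toList 0)
  · have hhit' : pvHit (words.map String.toList) enc.toList = true := by rw [← h0]; exact hhit
    simp only [hhit', if_true, h0]
    exact String.ofList_toList
  · have hhit' : pvHit (words.map String.toList) enc.toList = false := by
      rw [← h0]; simpa using hhit
    simp only [hhit, hhit', Bool.false_eq_true, if_false]
    rw [find?_pred_congr (words.map String.toList) enc.toList _ (by decide)]
    -- no word is empty (an empty word is a substring of enc itself)
    have hne : ∀ w ∈ words.map String.toList, w ≠ [] := by
      intro w hw hwnil
      have : pvHit (words.map String.toList) enc.toList = true :=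
        List.any_eq_true.mpr ⟨w, hw, by rw [hwnil]; exact PySem.Chars.isIn_nil _⟩
      rw [hhit'] at this; exact Bool.false_ne_true this
    cases hfind : (List.range' 1 25).find?
        (fun k : Nat => pvHit (words.map String.toList) (pvShiftBy (k : Int) enc.toList)) with
    | some k =>
        rcases List.find?_eq_some_iff_getElem.mp hfind with ⟨hpk, idx, hidx, hget, hmin⟩
        have hgetv : k = 1 + idx := by rw [← hget, List.getElem_range']; omega
        have hidx' : idx < 25 := by simpa using hidx
        -- (k : Int) is a collected nonzero shift
        have hkS : (k : Int) ∈ (pvShifts (pvDiffs enc.toList) enc.toList (words.map String.toList)).filter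
            (fun k => k != 0) := by
          apply List.mem_filter.mpr
          refine ⟨pvShifts_complete _ _ hne _ (by omega) (by omega) hpk, by
            simp; omega⟩
        -- hence the minimum exists and equals (k : Int)
        cases hm : PySem.List.min? ((pvShifts (pvDiffs enc.toList) enc.toList (words.map String.toList)).filter
            (fun k => k != 0)) (fun k => k) with
        | none =>
            rw [(PySem.List.min?_eq_none_iff _ _).mp hm] at hkS
            simp at hkS
        | some m =>
            have hmS := PySem.List.min?_mem hm
            rcases List.mem_filter.mp hmS with ⟨hmem, hm0⟩
            rcases pvShifts_sound _ _ _ hmem with ⟨hm0', hm26, hmp⟩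
            have hm1 : 1 ≤ m := by
              rcases lt_or_eq_of_le hm0' with h | h
              · omega
              · exfalso; exact absurd h.symm (by simpa using hm0)
            have hle : m ≤ (k : Int) := PySem.List.min?_isMin hm _ hkS
            have hmk : m = (k : Int) := by
              by_contra hne'
              have hlt : m < (k : Int) := lt_of_le_of_ne hle hne'
              have hmn : m.toNat < k := by omega
              have hj : m.toNat - 1 < idx := by omega
              have := hmin (m.toNat - 1) (by omega)
              rw [List.getElem_range'] at this
              have hidxeq : 1 + 1 * (m.toNat - 1) = m.toNat := by omega
              rw [hidxeq] at this
              have hcast : ((m.toNat : Nat) : Int) = m := by omega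
              rw [hcast] at this
              rw [hmp] at this
              simp at this
            rw [hmk]
            have hk0 : k ≠ 0 := by omega
            simp [pvAState, hk0]
    | none =>
        exfalso
        unfold Pre_solve at hpre
        rcases Bool.or_eq_true_iff.mp hpre with h | h
        · rw [hhit'] at h; exact Bool.false_ne_true h
        · rcases List.any_eq_true.mp h with ⟨kx, hkmem, hkp⟩
          have := List.find?_eq_none.mp hfind kx hkmem
          simp [hkp] at this
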